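-- pv_equiv track=rewrite | github.com/haobinzheng/ixia_automation | utils.py | clean_show_output_recursive_general
-- ===== SOURCE A (Python) =====
-- def clean_show_output_recursive_general(out_str_list,cmd_list):
-- 	for cmd in cmd_list:
-- 		for o in out_str_list:
-- 			if str(cmd) in str(o):
-- 				return out_str_list
-- 			else:
-- 				out_str_list.pop(0)
-- 				return clean_show_output_recursive(out_str_list,cmd)
--
-- def clean_show_output_recursive(out_str_list,cmd):
-- 	for o in out_str_list:
-- 		if str(cmd) in str(o):
-- 			return out_str_list
-- 		else:
-- 			out_str_list.pop(0)
-- 			return clean_show_output_recursive(out_str_list,cmd)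
-- ===== SOURCE B (Python) =====
-- def clean_show_output_recursive_general(out_str_list, cmd_list):
--     # Note: like A, mutates out_str_list in place (leading elements removed).
--     if not cmd_list or not out_str_list:
--         return None
--     needle = str(cmd_list[0])
--     idx = next((i for i, o in enumerate(out_str_list) if needle in str(o)), None)
--     if idx is None:
--         out_str_list.clear()
--         return None
--     del out_str_list[:idx]
--     return out_str_list
-- ===== Notes on version B (the rewrite author's own statement) =====
-- stated objective: simpler
-- what changed: Replaces A's two mutually-recursive pop-and-recurse functions by a single pass that finds the first element containing cmd_list[0] and drops the prefix before it (A only ever consults the first command).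
import Mathlib
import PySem

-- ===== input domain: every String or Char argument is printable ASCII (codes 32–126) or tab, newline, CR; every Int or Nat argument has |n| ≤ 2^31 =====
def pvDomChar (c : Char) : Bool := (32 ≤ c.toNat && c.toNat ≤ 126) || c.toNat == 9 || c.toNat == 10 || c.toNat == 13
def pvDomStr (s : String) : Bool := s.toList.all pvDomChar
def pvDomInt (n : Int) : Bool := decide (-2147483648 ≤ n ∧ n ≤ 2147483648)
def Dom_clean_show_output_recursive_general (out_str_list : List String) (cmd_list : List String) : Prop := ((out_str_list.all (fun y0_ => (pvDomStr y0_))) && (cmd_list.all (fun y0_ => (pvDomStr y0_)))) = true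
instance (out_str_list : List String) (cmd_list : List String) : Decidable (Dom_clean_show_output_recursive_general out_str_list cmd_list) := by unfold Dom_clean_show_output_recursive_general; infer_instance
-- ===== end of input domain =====

-- B replaces A's two-function recursion (which only ever consults cmd_list[0]) by a single
-- find-first-matching-index-then-drop pass; return-value equivalence only: both mutate the list in place.
-- ===== PORT A =====
-- helper of A: clean_show_output_recursive(out_str_list, cmd) — drop leading elements until one contains cmd
def pv_clean_show_output_recursive (out_str_list : List String) (cmd : String) : Option (List String) :=
  match out_str_list with
  | [] => none
  | o :: rest =>
    if PySem.Str.isIn cmd o then some (o :: rest)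
    else pv_clean_show_output_recursive rest cmd

def clean_show_output_recursive_general (out_str_list : List String) (cmd_list : List String) : Option (List String) :=
  match cmd_list with
  | [] => none
  | cmd :: cmds_rest =>
    match out_str_list with
    | [] => clean_show_output_recursive_general out_str_list cmds_rest  -- inner for-loop has no iteration; outer loop continues
    | o :: rest =>
      if PySem.Str.isIn cmd o then some (o :: rest)
      else pv_clean_show_output_recursive rest cmd

-- ===== PORT B =====
def clean_show_output_recursive_general_alt (out_str_list : List String) (cmd_list : List String) : Option (List String) :=
  match cmd_list, out_str_list with
  | [], _ => none
  | _, [] => none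
  | cmd :: _, _ =>
    match out_str_list.findIdx? (fun o => PySem.Str.isIn cmd o) with
    | some i => some (out_str_list.drop i)
    | none => none

-- ===== PRECONDITION & SPEC =====
def Spec_clean_show_output_recursive_general (out_str_list : List String) (cmd_list : List String) (out : Option (List String)) : Prop := out = clean_show_output_recursive_general_alt out_str_list cmd_list
instance (out_str_list : List String) (cmd_list : List String) (out : Option (List String)) : Decidable (Spec_clean_show_output_recursive_general out_str_list cmd_list out) := by unfold Spec_clean_show_output_recursive_general; infer_instance

-- ===== CLAIM (what is proved, stated in full; the proofs are below) =====
def Claim_equal_clean_show_output_recursive_general : Prop := ∀ (out_str_list : List String) (cmd_list : List String), Dom_clean_show_output_recursive_general out_str_list cmd_list → Spec_clean_show_output_recursive_general out_str_list cmd_list (clean_show_output_recursive_general out_str_list cmd_list)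

-- ===== LEMMAS AND PROOFS =====
-- A's helper recursion computes find-first-index-then-drop.
theorem pv_clean_rec_eq (out_str_list : List String) (cmd : String) :
    pv_clean_show_output_recursive out_str_list cmd =
      match out_str_list.findIdx? (fun o => PySem.Str.isIn cmd o) with
      | some i => some (out_str_list.drop i)
      | none => none := by
  induction out_str_list with
  | nil => rfl
  | cons o rest ih =>
    simp only [pv_clean_show_output_recursive, List.findIdx?_cons, PySem.Str.isIn] at ih ⊢
    by_cases h : PySem.Chars.isIn cmd.toList o.toList = true
    · simp [h]
    · simp only [h, Bool.false_eq_true, ite_false, ih]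
      cases rest.findIdx? (fun o => PySem.Chars.isIn cmd.toList o.toList) <;> simp

-- A with empty out_str_list returns none for every cmd_list.
theorem pv_general_nil (cmd_list : List String) :
    clean_show_output_recursive_general [] cmd_list = none := by
  induction cmd_list with
  | nil => rfl
  | cons c cs ih => simpa [clean_show_output_recursive_general] using ih

-- ===== VERDICT (by name: the statement is the Claim_ definition above) =====
theorem clean_show_output_recursive_general_spec : Claim_equal_clean_show_output_recursive_general := by
  intro out_str_list cmd_list _
  unfold Spec_clean_show_output_recursive_general
  cases cmd_list with
  | nil => cases out_str_list <;> rfl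
  | cons cmd cmds =>
    cases out_str_list with
    | nil =>
      simp [clean_show_output_recursive_general, pv_general_nil,
        clean_show_output_recursive_general_alt]
    | cons o rest =>
      show pv_clean_show_output_recursive (o :: rest) cmd = _
      rw [pv_clean_rec_eq]
      rfl
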